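-- pv_equiv track=rewrite | github.com/JoaoNunoAbreu/advent-of-code | 2022/day05/main.py | process_stack
-- ===== SOURCE A (Python) =====
-- def process_stack(stack, numbers):
--     d = {
--         k+1: []
--         for k in range(len(numbers))
--     }
--     for line in stack:
--         line = line.split(" ")
--         for index, char in enumerate(line):
--             if char != "_":
--                 d[index+1].append(char)
--
--     for key, value in d.items():
--         d[key] = value[::-1]
--
--     return d
-- ===== SOURCE B (Python) =====
-- def process_stack(stack, numbers):
--     rows = [line.split(" ") for line in reversed(stack)]
--     width = max(map(len, rows), default=0)
--     d = {k + 1: [] for k in range(len(numbers))}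
--     for k in range(min(width, len(numbers))):
--         d[k + 1] = [parts[k] for parts in rows if k < len(parts) and parts[k] != "_"]
--     return d
-- ===== Notes on version B (the rewrite author's own statement) =====
-- stated objective: alternative
-- what changed: B transposes the traversal: it splits every line once into rows, then builds each column with one indexed scan per key (bounded by the widest row) over reversed rows, so A's dict-list mutation during parsing and its final reverse-every-value pass both disappear.
import Mathlib
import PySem

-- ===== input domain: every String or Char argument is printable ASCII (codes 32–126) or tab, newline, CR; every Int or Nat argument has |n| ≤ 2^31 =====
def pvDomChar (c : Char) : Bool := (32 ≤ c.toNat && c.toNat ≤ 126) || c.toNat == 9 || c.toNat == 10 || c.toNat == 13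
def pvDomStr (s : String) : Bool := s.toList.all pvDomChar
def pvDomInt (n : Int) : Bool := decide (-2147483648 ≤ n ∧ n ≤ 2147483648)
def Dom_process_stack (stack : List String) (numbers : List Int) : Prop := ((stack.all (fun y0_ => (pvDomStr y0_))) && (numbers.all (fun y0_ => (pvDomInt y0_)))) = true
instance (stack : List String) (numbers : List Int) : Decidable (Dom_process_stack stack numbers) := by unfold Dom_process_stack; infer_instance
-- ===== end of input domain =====

-- B transposes the traversal (objective: alternative): it splits every line once into rows and
-- builds each column with one indexed scan per key over reversed rows, so A's dict-list mutation
-- during parsing and its final reverse-every-value pass both disappear.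

-- ===== PORT A =====
-- line.split(" "): sep " " is nonempty so Str.split? is always 'some'; getD [] is never the default
def pvTokens (line : String) : List String := (PySem.Str.split? line " ").getD []

def process_stack (stack : List String) (numbers : List Int) : List (Int × List String) :=
  let d : PySem.Dict Int (List String) :=
    (PySem.List.pyRange 0 (numbers.length : Int) 1).foldl
      (fun d k => d.insert (k + 1) []) PySem.Dict.empty
  -- under Pre_ the key index+1 is always present, so 'modify' is exactly d[index+1].append(char)
  let d := stack.foldl (fun d line =>
    (PySem.List.enumerate (pvTokens line)).foldl
      (fun d p => if p.2 ≠ "_" then d.modify (p.1 + 1) [] (fun v => v ++ [p.2]) else d) d) d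
  let d := d.items.foldl (fun d' p =>
    d'.insert p.1 ((PySem.List.slice? p.2 none none (-1)).getD [])) d
  d.items

-- ===== PORT B =====
def process_stack_alt (stack : List String) (numbers : List Int) : List (Int × List String) :=
  let rows := stack.reverse.map (fun line => pvTokens line)
  -- max(map(len, rows), default=0)
  let width : Int := PySem.List.maxD (rows.map (fun r => (r.length : Int))) id 0
  let d : PySem.Dict Int (List String) :=
    (PySem.List.pyRange 0 (numbers.length : Int) 1).foldl
      (fun d k => d.insert (k + 1) []) PySem.Dict.empty
  let d := (PySem.List.pyRange 0 (min width (numbers.length : Int)) 1).foldl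
    (fun d k => d.insert (k + 1)
      ((rows.filter (fun parts =>
          decide (k < (parts.length : Int)) && decide (PySem.List.pyGetD parts k "" ≠ "_"))).map
        (fun parts => PySem.List.pyGetD parts k ""))) d
  d.items

-- ===== PRECONDITION & SPEC =====
-- Pre_ excludes exactly the inputs where A raises KeyError: some line has a non-"_" token
-- at a column index ≥ len(numbers), so d[index+1] does not exist.
def Pre_process_stack (stack : List String) (numbers : List Int) : Prop :=
  ∀ line ∈ stack, ∀ t ∈ (pvTokens line).drop numbers.length, t = "_"
instance (stack : List String) (numbers : List Int) : Decidable (Pre_process_stack stack numbers) := by unfold Pre_process_stack; infer_instance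

def pvWitness_process_stack : List String × List Int := (["A _", "B C"], [10, 20])

def Spec_process_stack (stack : List String) (numbers : List Int) (out : List (Int × List String)) : Prop := out = process_stack_alt stack numbers
instance (stack : List String) (numbers : List Int) (out : List (Int × List String)) : Decidable (Spec_process_stack stack numbers out) := by unfold Spec_process_stack; infer_instance

-- ===== CLAIM (what is proved, stated in full; the proofs are below) =====
def Claim_equal_process_stack : Prop := ∀ (stack : List String) (numbers : List Int), Dom_process_stack stack numbers → Pre_process_stack stack numbers → Spec_process_stack stack numbers (process_stack stack numbers)

-- ===== LEMMAS AND PROOFS =====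

-- the tokens A appends to key k while scanning one line
def pvContrib (line : String) (k : Int) : List String :=
  (((PySem.List.enumerate (pvTokens line)).filter
      (fun p => p.1 + 1 == k && p.2 != "_")).map (fun p => p.2))

-- the tokens B keeps from one row for column k
def pvCellP (parts : List String) (k : Int) : List String :=
  if k < (parts.length : Int) ∧ PySem.List.pyGetD parts k "" ≠ "_"
  then [PySem.List.pyGetD parts k ""] else []

-- python's max(map(len, rows), default=0) over the rows of a stack
def pvWidth (stack : List String) : Int :=
  PySem.List.maxD ((stack.reverse.map (fun line => pvTokens line)).map
    (fun r => (r.length : Int))) id 0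

-- A's inner step / B's inner step, named for the lemmas
def pvStepA (d : PySem.Dict Int (List String)) (p : Int × String) : PySem.Dict Int (List String) :=
  if p.2 ≠ "_" then d.modify (p.1 + 1) [] (fun v => v ++ [p.2]) else d

lemma pvEnum_fst_lb (xs : List String) (s : Int) :
    ∀ p ∈ PySem.List.enumerate xs s, s ≤ p.1 := by
  induction xs generalizing s with
  | nil => simp [PySem.List.enumerate_nil]
  | cons x xs ih =>
    intro p hp
    rw [PySem.List.enumerate_cons] at hp
    rcases List.mem_cons.mp hp with h | h
    · simp [h]
    · have := ih (s + 1) p h; omega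

-- membership characterisation of enumerate
lemma pvMem_enumerate (xs : List String) (s : Int) (p : Int × String)
    (hp : p ∈ PySem.List.enumerate xs s) :
    ∃ i : Nat, ∃ h : i < xs.length, p.1 = s + i ∧ p.2 = xs[i] := by
  induction xs generalizing s with
  | nil => simp [PySem.List.enumerate_nil] at hp
  | cons x xs ih =>
    rw [PySem.List.enumerate_cons] at hp
    rcases List.mem_cons.mp hp with h | h
    · exact ⟨0, by simp, by simp [h]⟩
    · obtain ⟨i, hi, h1, h2⟩ := ih (s + 1) h
      refine ⟨i + 1, by simpa using hi, by simp [h1]; omega, by simp [h2]⟩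

-- getD through A's inner loop
lemma pvL1 (l : List (Int × String)) (d : PySem.Dict Int (List String)) (k : Int) :
    (l.foldl pvStepA d).getD k []
      = d.getD k [] ++ (l.filter (fun p => p.1 + 1 == k && p.2 != "_")).map (fun p => p.2) := by
  induction l generalizing d with
  | nil => simp
  | cons p l ih =>
    simp only [List.foldl_cons, List.filter_cons]
    by_cases hu : p.2 = "_"
    · simp [pvStepA, hu, ih]
    · by_cases hk : p.1 + 1 = k
      · simp [pvStepA, hu, hk, ih]
      · simp [pvStepA, hu, hk, ih, PySem.Dict.getD_modify, Ne.symm hk]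

-- getD through A's outer loop
lemma pvL2 (stack : List String) (d : PySem.Dict Int (List String)) (k : Int) :
    (stack.foldl (fun d line =>
        (PySem.List.enumerate (pvTokens line)).foldl pvStepA d) d).getD k []
      = d.getD k [] ++ (stack.map (fun line => pvContrib line k)).flatten := by
  induction stack generalizing d with
  | nil => simp
  | cons line stack ih =>
    simp only [List.foldl_cons, List.map_cons, List.flatten_cons]
    rw [ih, pvL1, pvContrib, List.append_assoc]

-- tokens that only A's inner loop could touch past a given index lie in the filter's dead zone
lemma pvNONE (xs : List String) (s j : Int) (h : j < s) :
    (PySem.List.enumerate xs s).filter (fun p => p.1 + 1 == j + 1 && p.2 != "_") = [] := by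
  rw [List.filter_eq_nil_iff]
  intro p hp
  have := pvEnum_fst_lb xs s p hp
  simp only [Bool.and_eq_true, beq_iff_eq, bne_iff_ne, not_and]
  intro hj; omega

-- one line's contribution to key j+1 is B's cell at column j
lemma pvCELL (xs : List String) : ∀ (s j : Int), s ≤ j →
    ((PySem.List.enumerate xs s).filter (fun p => p.1 + 1 == j + 1 && p.2 != "_")).map (fun p => p.2)
      = if (j - s).toNat < xs.length ∧ xs.getD (j - s).toNat "" ≠ "_"
        then [xs.getD (j - s).toNat ""] else [] := by
  induction xs with
  | nil => intro s j _; simp [PySem.List.enumerate_nil]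
  | cons x xs ih =>
    intro s j hsj
    rw [PySem.List.enumerate_cons, List.filter_cons]
    by_cases hsje : s = j
    · subst hsje
      have h0 : (s - s).toNat = 0 := by omega
      by_cases hx : x = "_"
      · simp [hx, pvNONE xs (s+1) s (by omega)]
      · simp [hx, pvNONE xs (s+1) s (by omega)]
    · have hne : (s + 1 == j + 1) = false := by simp; omega
      have hm : (j - s).toNat = (j - (s + 1)).toNat + 1 := by omega
      rw [if_neg (by simp only [Bool.and_eq_true, beq_iff_eq]; rintro ⟨h1, -⟩; exact hsje (by omega))]
      rw [ih (s+1) j (by omega), hm]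
      simp

lemma pvCell_eq_contrib (line : String) (i : Nat) :
    pvContrib line ((i : Int) + 1) = pvCellP (pvTokens line) (i : Int) := by
  rw [pvContrib, pvCELL (pvTokens line) 0 (i : Int) (by omega), pvCellP]
  simp [PySem.List.pyGetD_natCast, List.getD]

lemma pvCell_reverse (parts : List String) (k : Int) : (pvCellP parts k).reverse = pvCellP parts k := by
  rw [pvCellP]
  split <;> simp

-- initial dict: items and getD
lemma pvD0_getD : ∀ (l : List Int) (d : PySem.Dict Int (List String)) (k : Int),
    d.getD k [] = [] →
    (l.foldl (fun d k => d.insert (k + 1) ([] : List String)) d).getD k [] = [] := by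
  intro l
  induction l with
  | nil => intro d k h; simpa using h
  | cons a l ih =>
    intro d k h
    simp only [List.foldl_cons]
    apply ih
    rw [PySem.Dict.getD_insert]
    split <;> simp [h]

lemma pvD0_items (n : Nat) :
    ((PySem.List.pyRange 0 (n : Int) 1).foldl
      (fun d k => d.insert (k + 1) ([] : List String)) PySem.Dict.empty).items
      = (List.range n).map (fun i : Nat => ((i : Int) + 1, ([] : List String))) := by
  rw [PySem.List.pyRange_zero_nat]
  rw [PySem.Dict.items_foldl_insert_fresh _ (fun k => k + 1) (fun _ => []) _
      (by intro a _; exact PySem.Dict.contains_empty (ν := List String) a)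
      (by
        rw [List.map_map]
        exact List.Nodup.map (fun a b h => by
          have : ((a : Int) + 1 = (b : Int) + 1) := h
          omega) (List.nodup_range))]
  simp [PySem.Dict.empty]

-- keys are unchanged through A's main loop when every touched key is present
lemma pvKeysA_inner (l : List (Int × String)) :
    ∀ (d : PySem.Dict Int (List String)),
      (∀ p ∈ l, p.2 ≠ "_" → d.contains (p.1 + 1) = true) →
      (l.foldl pvStepA d).keys = d.keys := by
  induction l with
  | nil => intro d _; rfl
  | cons p l ih =>
    intro d hcont
    simp only [List.foldl_cons]
    by_cases hu : p.2 = "_"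
    · rw [show pvStepA d p = d by simp [pvStepA, hu]]
      exact ih d (fun q hq => hcont q (List.mem_cons_of_mem _ hq))
    · have hc := hcont p (List.mem_cons_self) hu
      have hkeys : (pvStepA d p).keys = d.keys := by
        simp only [pvStepA, if_pos hu]
        rw [PySem.Dict.keys_modify, PySem.Dict.keys_insert_of_contains _ _ hc]
      rw [ih (pvStepA d p) (fun q hq hq2 => ?_), hkeys]
      have := hcont q (List.mem_cons_of_mem _ hq) hq2
      rw [PySem.Dict.contains_eq_decide_mem_keys] at this ⊢
      rw [hkeys]; exact this

lemma pvKeysA_outer (stack : List String) :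
    ∀ (d : PySem.Dict Int (List String)),
      (∀ line ∈ stack, ∀ p ∈ PySem.List.enumerate (pvTokens line), p.2 ≠ "_" → d.contains (p.1 + 1) = true) →
      (stack.foldl (fun d line => (PySem.List.enumerate (pvTokens line)).foldl pvStepA d) d).keys = d.keys := by
  induction stack with
  | nil => intro d _; rfl
  | cons line stack ih =>
    intro d hcont
    simp only [List.foldl_cons]
    have h1 := pvKeysA_inner (PySem.List.enumerate (pvTokens line)) d
      (hcont line List.mem_cons_self)
    rw [ih _ (fun l hl p hp hp2 => ?_), h1]
    have := hcont l (List.mem_cons_of_mem _ hl) p hp hp2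
    rw [PySem.Dict.contains_eq_decide_mem_keys] at this ⊢
    rw [h1]; exact this

-- third loop: keys unchanged and getD characterised
lemma pvKeys3 (f : Int × List String → List String) (l : List (Int × List String)) :
    ∀ (d : PySem.Dict Int (List String)),
      (∀ p ∈ l, d.contains p.1 = true) →
      (l.foldl (fun d' p => d'.insert p.1 (f p)) d).keys = d.keys := by
  induction l with
  | nil => intro d _; rfl
  | cons p l ih =>
    intro d hcont
    simp only [List.foldl_cons]
    have hkeys := PySem.Dict.keys_insert_of_contains d (f p) (hcont p List.mem_cons_self)
    rw [ih _ (fun q hq => ?_), hkeys]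
    have := hcont q (List.mem_cons_of_mem _ hq)
    rw [PySem.Dict.contains_eq_decide_mem_keys] at this ⊢
    rw [hkeys]; exact this

lemma pvGetD3_notmem (f : Int × List String → List String) (l : List (Int × List String)) :
    ∀ (d : PySem.Dict Int (List String)) (k : Int), k ∉ l.map (fun p => p.1) →
      (l.foldl (fun d' p => d'.insert p.1 (f p)) d).getD k [] = d.getD k [] := by
  induction l with
  | nil => intro d k _; rfl
  | cons p l ih =>
    intro d k hk
    simp only [List.map_cons, List.mem_cons] at hk
    rw [not_or] at hk
    simp only [List.foldl_cons]
    rw [ih _ _ hk.2, PySem.Dict.getD_insert, if_neg hk.1]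

lemma pvGetD3_mem (f : Int × List String → List String) (l : List (Int × List String)) :
    ∀ (d : PySem.Dict Int (List String)) (k : Int) (v : List String),
      (l.map (fun p => p.1)).Nodup → (k, v) ∈ l →
      (l.foldl (fun d' p => d'.insert p.1 (f p)) d).getD k [] = f (k, v) := by
  induction l with
  | nil => intro d k v _ h; simp at h
  | cons p l ih =>
    intro d k v hnd hmem
    simp only [List.map_cons, List.nodup_cons] at hnd
    simp only [List.foldl_cons]
    rcases List.mem_cons.mp hmem with h | h
    · subst h
      rw [pvGetD3_notmem f l _ _ hnd.1, PySem.Dict.getD_insert, if_pos rfl]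
    · exact ih _ _ _ hnd.2 h

-- maxD facts, to bound every row's length by the computed width
lemma pvMax?_cons_cons (b c : Int) (t : List Int) :
    PySem.List.max? (b :: c :: t) id = PySem.List.max? ((if b < c then c else b) :: t) id := by
  simp only [PySem.List.max?, List.foldl_cons, id]
  split <;> rfl

lemma pvMax?_cons_isSome : ∀ (t : List Int) (b : Int), (PySem.List.max? (b :: t) id).isSome := by
  intro t
  induction t with
  | nil => intro b; rfl
  | cons c t ih =>
    intro b
    rw [pvMax?_cons_cons]
    exact ih _

lemma pvLe_maxD (l : List Int) (x : Int) (hx : x ∈ l) : x ≤ PySem.List.maxD l id 0 := by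
  rw [PySem.List.maxD]
  cases l with
  | nil => simp at hx
  | cons a t =>
    cases h : PySem.List.max? (a :: t) id with
    | none => have := pvMax?_cons_isSome t a; rw [h] at this; simp at this
    | some m => simpa using PySem.List.max?_isMax h x hx

-- B's list comprehension is a flatten of cells
lemma pvFilterMap (k : Int) (rows : List (List String)) :
    (rows.filter (fun parts =>
        decide (k < (parts.length : Int)) && decide (PySem.List.pyGetD parts k "" ≠ "_"))).map
      (fun parts => PySem.List.pyGetD parts k "")
      = (rows.map (fun parts => pvCellP parts k)).flatten := by
  induction rows with
  | nil => rfl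
  | cons parts rows ih =>
    rw [List.filter_cons, List.map_cons, List.flatten_cons]
    by_cases h : k < ((parts.length : Int)) ∧ PySem.List.pyGetD parts k "" ≠ "_"
    · rw [if_pos (by simp [h.1, h.2]), List.map_cons, ih]
      simp only [pvCellP, if_pos h, List.singleton_append]
    · rw [if_neg (by simpa using fun h1 h2 => h ⟨h1, h2⟩), ih]
      simp only [pvCellP, if_neg h, List.nil_append]

-- getD and keys through B's insert loop over fresh integer keys
lemma pvInsNotMem (g : Int → List String) (l : List Int) :
    ∀ (d : PySem.Dict Int (List String)) (q : Int), q ∉ l.map (fun k => k + 1) →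
      (l.foldl (fun d k => d.insert (k + 1) (g k)) d).getD q [] = d.getD q [] := by
  induction l with
  | nil => intro d q _; rfl
  | cons k l ih =>
    intro d q hq
    simp only [List.map_cons, List.mem_cons] at hq
    rw [not_or] at hq
    simp only [List.foldl_cons]
    rw [ih _ _ hq.2, PySem.Dict.getD_insert, if_neg hq.1]

lemma pvInsMem (g : Int → List String) (l : List Int) :
    ∀ (d : PySem.Dict Int (List String)) (k : Int),
      (l.map (fun k => k + 1)).Nodup → k ∈ l →
      (l.foldl (fun d k => d.insert (k + 1) (g k)) d).getD (k + 1) [] = g k := by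
  induction l with
  | nil => intro d k _ h; simp at h
  | cons a l ih =>
    intro d k hnd hmem
    simp only [List.map_cons, List.nodup_cons] at hnd
    simp only [List.foldl_cons]
    rcases List.mem_cons.mp hmem with h | h
    · subst h
      rw [pvInsNotMem g l _ _ hnd.1, PySem.Dict.getD_insert, if_pos rfl]
    · exact ih _ _ hnd.2 h

lemma pvKeysIns (g : Int → List String) (l : List Int) :
    ∀ (d : PySem.Dict Int (List String)),
      (∀ k ∈ l, d.contains (k + 1) = true) →
      (l.foldl (fun d k => d.insert (k + 1) (g k)) d).keys = d.keys := by
  induction l with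
  | nil => intro d _; rfl
  | cons a l ih =>
    intro d hcont
    simp only [List.foldl_cons]
    have hkeys := PySem.Dict.keys_insert_of_contains d (g a) (hcont a List.mem_cons_self)
    rw [ih _ (fun k hk => ?_), hkeys]
    have := hcont k (List.mem_cons_of_mem _ hk)
    rw [PySem.Dict.contains_eq_decide_mem_keys] at this ⊢
    rw [hkeys]; exact this

-- B's items
lemma pvItemsB (stack : List String) (numbers : List Int) :
    process_stack_alt stack numbers
      = (List.range numbers.length).map (fun i : Nat =>
          ((i : Int) + 1,
           if (i : Int) < min (pvWidth stack) ((numbers.length : Int)) then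
             (stack.reverse.map (fun line => pvCellP (pvTokens line) (i : Int))).flatten
           else [])) := by
  simp only [process_stack_alt]
  set n := numbers.length with hn
  set rows := stack.reverse.map (fun line => pvTokens line) with hrows
  set w : Int := PySem.List.maxD (rows.map (fun r => (r.length : Int))) id 0 with hw
  have hwW : w = pvWidth stack := rfl
  set d0 : PySem.Dict Int (List String) :=
    (PySem.List.pyRange 0 (n : Int) 1).foldl (fun d k => d.insert (k + 1) []) PySem.Dict.empty with hd0
  have h0items : d0.items = (List.range n).map (fun i : Nat => ((i : Int) + 1, ([] : List String))) :=
    pvD0_items n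
  have hkeys0 : d0.keys = (List.range n).map (fun i : Nat => ((i : Int) + 1)) := by
    simp only [PySem.Dict.keys, h0items, List.map_map]; rfl
  have hnodup0 : d0.keys.Nodup := by
    rw [hkeys0]
    exact List.Nodup.map (fun a b h => by
      have : ((a : Int) + 1 = (b : Int) + 1) := h
      omega) List.nodup_range
  set g : Int → List String := fun k =>
    (rows.filter (fun parts =>
        decide (k < (parts.length : Int)) && decide (PySem.List.pyGetD parts k "" ≠ "_"))).map
      (fun parts => PySem.List.pyGetD parts k "") with hg
  set m : Int := min w (n : Int) with hm
  have hcont : ∀ k ∈ PySem.List.pyRange 0 m 1, d0.contains (k + 1) = true := by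
    intro k hk
    rw [PySem.List.mem_pyRange_one] at hk
    rw [PySem.Dict.contains_eq_decide_mem_keys, hkeys0]
    simp only [decide_eq_true_eq, List.mem_map, List.mem_range]
    exact ⟨k.toNat, by omega, by omega⟩
  set d1 : PySem.Dict Int (List String) :=
    (PySem.List.pyRange 0 m 1).foldl (fun d k => d.insert (k + 1) (g k)) d0 with hd1
  have hkeys1 : d1.keys = d0.keys := pvKeysIns g _ d0 hcont
  have hnodup1 : d1.keys.Nodup := by rw [hkeys1]; exact hnodup0
  rw [PySem.Dict.items_eq_map_keys d1 hnodup1 [], hkeys1, hkeys0, List.map_map]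
  apply List.map_congr_left
  intro i hi
  simp only [List.mem_range] at hi
  simp only [Function.comp_apply]
  by_cases hlt : (i : Int) < m
  · rw [if_pos (by rw [← hwW, ← hm]; exact hlt)]
    rw [hd1, pvInsMem g _ d0 (i : Int)
        (by
          exact List.Nodup.map (fun a b h => by omega) (PySem.List.nodup_pyRange_one 0 m))
        (PySem.List.mem_pyRange_one.mpr ⟨by omega, hlt⟩)]
    rw [show g ((i : Int)) = (rows.map (fun parts => pvCellP parts ((i : Int)))).flatten
        from pvFilterMap _ _, hrows, List.map_map]
    rfl
  · rw [if_neg (by rw [← hwW, ← hm]; exact hlt)]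
    rw [hd1, pvInsNotMem g _ d0 _
        (by
          simp only [List.mem_map]
          rintro ⟨k, hk, hk1⟩
          rw [PySem.List.mem_pyRange_one] at hk
          exact hlt (by omega)),
      hd0]
    refine Prod.ext rfl ?_
    refine pvD0_getD _ _ _ ?_
    rfl

lemma pvColEq (stack : List String) (i : Nat) :
    ((stack.map (fun line => pvContrib line ((i : Int) + 1))).flatten).reverse
      = (stack.reverse.map (fun line => pvCellP (pvTokens line) (i : Int))).flatten := by
  have hg : (fun line => pvContrib line ((i : Int) + 1)) = fun line => pvCellP (pvTokens line) (i : Int) := by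
    funext line; exact pvCell_eq_contrib line i
  rw [hg, List.reverse_flatten]
  congr 1
  rw [show (List.map List.reverse (stack.map fun line => pvCellP (pvTokens line) (i : Int)))
        = stack.map (fun line => pvCellP (pvTokens line) (i : Int)) by
      rw [List.map_map]; exact List.map_congr_left (fun line _ => pvCell_reverse (pvTokens line) (i : Int))]
  rw [List.map_reverse]

theorem process_stack_spec : Claim_equal_process_stack := by
  intro stack numbers _ hpre
  unfold Spec_process_stack
  simp only [process_stack]
  rw [pvItemsB]
  rw [show (fun (d : PySem.Dict Int (List String)) (p : Int × String) =>
      if p.2 ≠ "_" then d.modify (p.1 + 1) [] (fun v => v ++ [p.2]) else d) = pvStepA from rfl]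
  set n := numbers.length with hn
  set d0 : PySem.Dict Int (List String) :=
    (PySem.List.pyRange 0 (n : Int) 1).foldl (fun d k => d.insert (k + 1) []) PySem.Dict.empty with hd0
  set d2 : PySem.Dict Int (List String) :=
    stack.foldl (fun d line => (PySem.List.enumerate (pvTokens line)).foldl pvStepA d) d0 with hd2
  -- initial dict facts
  have h0items : d0.items = (List.range n).map (fun i : Nat => ((i : Int) + 1, ([] : List String))) :=
    pvD0_items n
  have hkeys0 : d0.keys = (List.range n).map (fun i : Nat => ((i : Int) + 1)) := by
    simp only [PySem.Dict.keys, h0items, List.map_map]; rfl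
  have hnodup0 : d0.keys.Nodup := by
    rw [hkeys0]
    exact List.Nodup.map (fun a b h => by
      have : ((a : Int) + 1 = (b : Int) + 1) := h
      omega) List.nodup_range
  -- Pre_ gives: every key A's loop touches is already present
  have Hc : ∀ line ∈ stack, ∀ p ∈ PySem.List.enumerate (pvTokens line),
      p.2 ≠ "_" → d0.contains (p.1 + 1) = true := by
    intro line hline p hp hne
    obtain ⟨i, hi, h1, h2⟩ := pvMem_enumerate (pvTokens line) 0 p hp
    have hin : i < n := by
      by_contra hge
      have hlt : i - n < ((pvTokens line).drop n).length := by
        rw [List.length_drop]; omega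
      have : ((pvTokens line).drop n)[i - n] = (pvTokens line)[i]'hi := by
        rw [List.getElem_drop]; congr 1; omega
      exact hne (by rw [h2, ← this]; exact hpre line hline _ (List.getElem_mem hlt))
    rw [PySem.Dict.contains_eq_decide_mem_keys, hkeys0]
    simp only [decide_eq_true_eq, List.mem_map, List.mem_range]
    exact ⟨i, hin, by rw [h1]; ring⟩
  have hkeys2 : d2.keys = d0.keys := pvKeysA_outer stack d0 Hc
  have hnodup2 : d2.keys.Nodup := by rw [hkeys2]; exact hnodup0
  have hgetD2 : ∀ k, d2.getD k [] = (stack.map (fun line => pvContrib line k)).flatten := by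
    intro k
    rw [hd2, pvL2]
    have : d0.getD k [] = [] := by
      rw [hd0]
      exact pvD0_getD _ _ _ (by simp)
    rw [this, List.nil_append]
  -- the third loop
  set f : Int × List String → List String :=
    fun p => (PySem.List.slice? p.2 none none (-1)).getD [] with hf
  have hcont2 : ∀ p ∈ d2.items, d2.contains p.1 = true := by
    intro p hp
    rw [PySem.Dict.contains_eq_decide_mem_keys]
    simpa using PySem.Dict.mem_keys_of_mem_items _ hp
  set d3 : PySem.Dict Int (List String) :=
    d2.items.foldl (fun d' p => d'.insert p.1 (f p)) d2 with hd3
  have hkeys3 : d3.keys = d2.keys := pvKeys3 f d2.items d2 hcont2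
  have hnodup3 : d3.keys.Nodup := by rw [hkeys3]; exact hnodup2
  have hfstnodup : (d2.items.map (fun p => p.1)).Nodup := hnodup2
  have hgetD3 : ∀ k, k ∈ d2.keys → d3.getD k [] = (d2.getD k []).reverse := by
    intro k hk
    have hmem : (k, d2.getD k []) ∈ d2.items := by
      rw [PySem.Dict.items_eq_map_keys d2 hnodup2 []]
      exact List.mem_map.mpr ⟨k, hk, rfl⟩
    rw [hd3, pvGetD3_mem f d2.items d2 k (d2.getD k []) hfstnodup hmem, hf]
    simp [PySem.List.slice?_none_none_neg_one]
  -- assemble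
  rw [PySem.Dict.items_eq_map_keys d3 hnodup3 [], hkeys3, hkeys2, hkeys0, List.map_map]
  apply List.map_congr_left
  intro i hi
  simp only [List.mem_range] at hi
  have hkmem : ((i : Int) + 1) ∈ d2.keys := by
    rw [hkeys2, hkeys0]
    exact List.mem_map.mpr ⟨i, List.mem_range.mpr hi, rfl⟩
  simp only [Function.comp_apply]
  rw [hgetD3 _ hkmem, hgetD2, pvColEq]
  by_cases hlt : (i : Int) < min (pvWidth stack) ((n : Int))
  · rw [if_pos hlt]
  · rw [if_neg hlt]
    refine Prod.ext rfl ?_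
    -- i ≥ width: every row is shorter than i+1, so no cell contributes
    have hwle : pvWidth stack ≤ (i : Int) := by
      rcases lt_or_ge (pvWidth stack) ((n : Int)) with h | h
      · simp only [min_eq_left h.le] at hlt; omega
      · simp only [min_eq_right h] at hlt; omega
    rw [List.flatten_eq_nil_iff]
    intro l hl
    rcases List.mem_map.mp hl with ⟨line, hline, rfl⟩
    have hlen : ((pvTokens line).length : Int) ≤ pvWidth stack := by
      apply pvLe_maxD
      exact List.mem_map.mpr ⟨pvTokens line,
        List.mem_map.mpr ⟨line, hline, rfl⟩, rfl⟩
    rw [pvCellP, if_neg (by rintro ⟨h1, -⟩; omega)]
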